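-- pv_equiv track=rewrite | github.com/ss2226/cse891-fall2011 | HW10_singhal.py | get_dates_by_fishlist
-- ===== SOURCE A (Python) =====
-- def make_dates_dict(fish_d):
--     dates_d = {}
--
--     for date in fish_d.keys():
--         fish_list = fish_d.get(date)
--         fish_set = set(fish_list)
--         for fish in fish_set:
--             date_list = dates_d.get(fish, [])
--             date_list.append(date)
--             dates_d[fish] = date_list
--
--     return dates_d
--
-- def get_dates_by_fishlist(fish_d, fishlist):
--   dates_d = make_dates_dict(fish_d)
--   res_dict = {}
--   for fish in fishlist:
--     res_dict[fish] = dates_d.get(fish, [])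
--
--   res_list = []
--   for key in res_dict:
--     res_list.extend(res_dict[key])
--
--   return res_list
-- ===== SOURCE B (Python) =====
-- def get_dates_by_fishlist(fish_d, fishlist):
--     res = []
--     seen = set()
--     for fish in fishlist:
--         if fish in seen:
--             continue
--         seen.add(fish)
--         for date, fishes in fish_d.items():
--             if fish in fishes:
--                 res.append(date)
--     return res
-- ===== Notes on version B (the rewrite author's own statement) =====
-- stated objective: simpler
-- what changed: Drops the full map inversion (make_dates_dict) and the intermediate result dict: B walks the requested fish once in first-occurrence order with a seen-set and scans fish_d's dates directly for each distinct fish.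
import Mathlib
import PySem

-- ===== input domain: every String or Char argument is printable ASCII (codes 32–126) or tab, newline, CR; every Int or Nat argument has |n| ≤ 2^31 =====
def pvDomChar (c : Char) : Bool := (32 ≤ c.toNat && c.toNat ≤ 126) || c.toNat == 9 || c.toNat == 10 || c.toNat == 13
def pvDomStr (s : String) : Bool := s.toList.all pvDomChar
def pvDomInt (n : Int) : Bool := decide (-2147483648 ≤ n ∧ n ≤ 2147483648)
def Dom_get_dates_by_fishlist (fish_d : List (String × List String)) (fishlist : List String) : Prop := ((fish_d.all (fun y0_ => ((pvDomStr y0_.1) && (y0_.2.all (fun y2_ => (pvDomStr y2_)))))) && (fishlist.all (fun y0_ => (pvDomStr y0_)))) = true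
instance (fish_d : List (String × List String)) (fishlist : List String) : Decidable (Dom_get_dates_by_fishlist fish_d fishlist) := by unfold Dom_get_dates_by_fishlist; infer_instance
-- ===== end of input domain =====

-- B drops the inverted map (make_dates_dict) and the intermediate result dict:
-- it walks the requested fish once in first-occurrence order with a seen-set and
-- scans fish_d's dates directly for each distinct fish (objective: simpler).

-- ===== PORT A =====
def make_dates_dict (fish_d : List (String × List String)) : PySem.Dict String (List String) :=
  fish_d.foldl
    (fun dates_d p =>
      (PySem.Set.ofList p.2).foldl
        (fun dd fish => dd.modify fish [] (fun date_list => date_list ++ [p.1]))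
        dates_d)
    PySem.Dict.empty

def get_dates_by_fishlist (fish_d : List (String × List String)) (fishlist : List String) : List String :=
  let dates_d := make_dates_dict fish_d
  let res_dict := fishlist.foldl (fun rd fish => rd.insert fish (dates_d.getD fish [])) PySem.Dict.empty
  res_dict.keys.foldl (fun res_list key => res_list ++ res_dict.getD key []) []

-- ===== PORT B =====
def get_dates_by_fishlist_alt (fish_d : List (String × List String)) (fishlist : List String) : List String :=
  (fishlist.foldl
    (fun (st : PySem.Set String × List String) fish =>
      if st.1.contains fish then st
      else (st.1.add fish,
            fish_d.foldl (fun res p => if p.2.contains fish then res ++ [p.1] else res) st.2))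
    ((PySem.Set.empty : PySem.Set String), ([] : List String))).2

-- ===== PRECONDITION & SPEC =====
def Spec_get_dates_by_fishlist (fish_d : List (String × List String)) (fishlist : List String) (out : List String) : Prop := out = get_dates_by_fishlist_alt fish_d fishlist
instance (fish_d : List (String × List String)) (fishlist : List String) (out : List String) : Decidable (Spec_get_dates_by_fishlist fish_d fishlist out) := by unfold Spec_get_dates_by_fishlist; infer_instance

-- ===== CLAIM (what is proved, stated in full; the proofs are below) =====
def Claim_equal_get_dates_by_fishlist : Prop := ∀ (fish_d : List (String × List String)) (fishlist : List String), Dom_get_dates_by_fishlist fish_d fishlist → Spec_get_dates_by_fishlist fish_d fishlist (get_dates_by_fishlist fish_d fishlist)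

-- ===== LEMMAS AND PROOFS =====

-- dates (in key order) whose fish list contains `fish` — the value both programs emit per distinct fish
def pvDates (fish_d : List (String × List String)) (fish : String) : List String :=
  ((fish_d.filter (fun p => p.2.contains fish)).map (fun p => p.1))

-- the keys fed in, restricted to first occurrences not already in `seen`
def pvNewKeys (seen : List String) : List String → List String
  | [] => []
  | f :: t => if f ∈ seen then pvNewKeys seen t else f :: pvNewKeys (seen ++ [f]) t

-- one date's inner loop of A: appending `date` under every distinct fish of the date's list
lemma getD_setfold (s : List String) (hs : s.Nodup) (dd : PySem.Dict String (List String))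
    (date fish : String) :
    (s.foldl (fun dd f => dd.modify f [] (fun date_list => date_list ++ [date])) dd).getD fish []
      = dd.getD fish [] ++ (if fish ∈ s then [date] else []) := by
  induction s generalizing dd with
  | nil => simp
  | cons g t ih =>
    rcases List.nodup_cons.mp hs with ⟨hg, ht⟩
    simp only [List.foldl_cons]
    by_cases h : fish = g
    · subst h
      rw [ih ht, PySem.Dict.getD_modify_self]
      simp [hg]
    · rw [ih ht, PySem.Dict.getD_modify_of_ne _ _ _ h]
      simp [List.mem_cons, h]

-- A's inverted map, looked up at one fish, is exactly pvDates
lemma getD_make (fish_d : List (String × List String)) (fish : String) :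
    (make_dates_dict fish_d).getD fish [] = pvDates fish_d fish := by
  suffices h : ∀ dd : PySem.Dict String (List String),
      (fish_d.foldl
        (fun dates_d p =>
          (PySem.Set.ofList p.2).foldl
            (fun dd f => dd.modify f [] (fun date_list => date_list ++ [p.1])) dates_d)
        dd).getD fish []
      = dd.getD fish [] ++ pvDates fish_d fish by
    simpa [make_dates_dict] using h PySem.Dict.empty
  induction fish_d with
  | nil => simp [pvDates]
  | cons p t ih =>
    intro dd
    simp only [List.foldl_cons]
    rw [ih, getD_setfold _ (PySem.Set.nodup_ofList p.2)]
    by_cases hm : fish ∈ p.2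
    · simp [pvDates, PySem.Set.mem_ofList, hm]
    · simp [pvDates, PySem.Set.mem_ofList, hm]

-- A's res_dict loop: keys are the fresh first occurrences, values stay v
lemma resdict_inv (v : String → List String) :
    ∀ (fl : List String) (rd : PySem.Dict String (List String)),
      (∀ k ∈ rd.keys, rd.getD k [] = v k) →
      (fl.foldl (fun rd f => rd.insert f (v f)) rd).keys = rd.keys ++ pvNewKeys rd.keys fl ∧
      (∀ k ∈ (fl.foldl (fun rd f => rd.insert f (v f)) rd).keys,
        (fl.foldl (fun rd f => rd.insert f (v f)) rd).getD k [] = v k) := by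
  intro fl
  induction fl with
  | nil => intro rd h; simpa [pvNewKeys] using h
  | cons f t ih =>
    intro rd h
    have hval : ∀ k ∈ (rd.insert f (v f)).keys, (rd.insert f (v f)).getD k [] = v k := by
      intro k hk
      rw [PySem.Dict.getD_insert]
      rcases (PySem.Dict.mem_keys_insert rd f k (v f)).mp hk with hkf | hkm
      · simp [hkf]
      · by_cases hkf : k = f
        · simp [hkf]
        · simp [hkf, h k hkm]
    obtain ⟨hkeys, hget⟩ := ih (rd.insert f (v f)) hval
    by_cases hf : f ∈ rd.keys
    · have hc : rd.contains f = true := (PySem.Dict.contains_iff_mem_keys rd f).mpr hf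
      have hkeq : (rd.insert f (v f)).keys = rd.keys := PySem.Dict.keys_insert_of_contains rd (v f) hc
      constructor
      · simp only [List.foldl_cons]
        rw [hkeys, hkeq, pvNewKeys, if_pos hf]
      · simpa only [List.foldl_cons] using hget
    · have hc : rd.contains f = false := by
        rcases Bool.eq_false_or_eq_true (rd.contains f) with h' | h'
        · exact absurd ((PySem.Dict.contains_iff_mem_keys rd f).mp h') hf
        · exact h'
      have hkeq : (rd.insert f (v f)).keys = rd.keys ++ [f] :=
        PySem.Dict.keys_insert_of_not_contains rd (v f) hc
      constructor
      · simp only [List.foldl_cons]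
        rw [hkeys, hkeq, pvNewKeys, if_neg hf, List.append_assoc]
        simp
      · simpa only [List.foldl_cons] using hget

-- A's final extend loop under "each stored value is v"
lemma foldl_extend (g v : String → List String) :
    ∀ (l : List String) (acc : List String), (∀ k ∈ l, g k = v k) →
      l.foldl (fun res k => res ++ g k) acc = acc ++ l.flatMap v := by
  intro l
  induction l with
  | nil => simp
  | cons k t ih =>
    intro acc h
    simp only [List.foldl_cons, List.flatMap_cons]
    rw [h k List.mem_cons_self, ih (acc ++ v k) (fun x hx => h x (List.mem_cons_of_mem _ hx)),
      List.append_assoc]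

-- B's loop produces the dates of every fresh fish, in first-occurrence order
lemma alt_inv (fish_d : List (String × List String)) :
    ∀ (fl : List String) (seen : PySem.Set String) (res : List String),
      (fl.foldl
        (fun (st : PySem.Set String × List String) fish =>
          if st.1.contains fish then st
          else (st.1.add fish,
                fish_d.foldl (fun res p => if p.2.contains fish then res ++ [p.1] else res) st.2))
        (seen, res)).2
      = res ++ (pvNewKeys seen fl).flatMap (pvDates fish_d) := by
  intro fl
  induction fl with
  | nil => intro seen res; simp [pvNewKeys]
  | cons f t ih =>
    intro seen res
    simp only [List.foldl_cons]
    by_cases hf : f ∈ seen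
    · have hc : PySem.Set.contains seen f = true := by
        rw [PySem.Set.contains_eq_listContains]; simpa using hf
      rw [hc]
      simp only [if_true]
      rw [ih seen res, pvNewKeys, if_pos hf]
    · have hc : PySem.Set.contains seen f = false := by
        rw [PySem.Set.contains_eq_listContains]; simpa using hf
      rw [hc]
      simp only [Bool.false_eq_true, if_false]
      rw [PySem.List.foldl_append_if (fun p => p.2.contains f) (fun p => p.1) fish_d res,
        ih (seen.add f) _, PySem.Set.add_of_not_mem hf, pvNewKeys, if_neg hf,
        List.flatMap_cons, pvDates, List.append_assoc]

-- ===== VERDICT (by name: the statement is the Claim_ definition above) =====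
theorem get_dates_by_fishlist_spec : Claim_equal_get_dates_by_fishlist := by
  intro fish_d fishlist _
  unfold Spec_get_dates_by_fishlist get_dates_by_fishlist get_dates_by_fishlist_alt
  simp only []
  obtain ⟨hkeys, hget⟩ :=
    resdict_inv (fun f => (make_dates_dict fish_d).getD f []) fishlist PySem.Dict.empty (by simp)
  rw [foldl_extend _ _ _ _ hget, hkeys, PySem.Dict.keys_empty, List.nil_append, List.nil_append,
    alt_inv fish_d fishlist PySem.Set.empty [], List.nil_append]
  have hv : (fun f => (make_dates_dict fish_d).getD f []) = pvDates fish_d :=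
    funext (fun f => getD_make fish_d f)
  rw [hv]
  rfl
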